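-- pv_equiv track=rewrite | github.com/petercrackthecode/LeetcodePractice | two_sum_II/my_solution.py | binary_search_except_index
-- ===== SOURCE A (Python) =====
-- from typing import List
--
-- def binary_search_except_index(numbers: List[int], to_be_found_number: int, omitted_index: int):
--     start = 0
--     end = len(numbers) - 1
--     while start <= end:
--         mid = (end - start) // 2 + start
--         if numbers[mid] == to_be_found_number and mid != omitted_index:
--             return mid
--         elif numbers[mid] >= to_be_found_number:
--             end = mid - 1
--         else:
--             start = mid + 1
--     return -1
-- ===== SOURCE B (Python) =====
-- def binary_search_except_index(numbers, to_be_found_number, omitted_index):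
--     # Recursive divide-and-conquer on list slices instead of an index-window loop.
--     def go(sub, offset):
--         if not sub:
--             return -1
--         m = (len(sub) - 1) // 2
--         v = sub[m]
--         if v < to_be_found_number:
--             return go(sub[m + 1:], offset + m + 1)
--         if v == to_be_found_number and offset + m != omitted_index:
--             return offset + m
--         return go(sub[:m], offset)
--     return go(numbers, 0)
-- ===== Notes on version B (the rewrite author's own statement) =====
-- stated objective: alternative
-- what changed: Replaced A's imperative while-loop over an index window [start,end] by a recursive divide-and-conquer helper on list slices (empty-slice base case, three-way comparison, offset carried for absolute indices).
import Mathlib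
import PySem

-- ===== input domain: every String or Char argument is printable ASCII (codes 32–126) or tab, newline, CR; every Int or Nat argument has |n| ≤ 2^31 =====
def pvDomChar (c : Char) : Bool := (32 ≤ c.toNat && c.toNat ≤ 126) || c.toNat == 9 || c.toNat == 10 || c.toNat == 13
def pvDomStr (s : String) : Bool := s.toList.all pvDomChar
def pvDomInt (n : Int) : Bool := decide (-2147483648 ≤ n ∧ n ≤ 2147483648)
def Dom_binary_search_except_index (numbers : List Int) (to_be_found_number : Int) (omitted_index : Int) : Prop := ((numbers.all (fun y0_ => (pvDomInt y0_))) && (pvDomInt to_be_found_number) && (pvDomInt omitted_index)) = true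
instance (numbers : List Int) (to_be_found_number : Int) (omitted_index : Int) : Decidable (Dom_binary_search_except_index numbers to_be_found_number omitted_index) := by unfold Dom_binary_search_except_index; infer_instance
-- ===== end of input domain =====

-- B replaces A's index-window while-loop by a recursive divide-and-conquer on list slices (objective: alternative decomposition, same cost).

-- ===== PORT A =====
-- A's while loop over the window [start, end], as recursion on that window.
-- numbers[mid] is provably in range on every iteration reachable from the initial
-- call (0 ≤ start, end ≤ len-1 are loop invariants), so pyGetD's default 0 is never used.
def bseLoopA (numbers : List Int) (t o : Int) (start end_ : Int) : Int :=
  if _h : start ≤ end_ then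
    let mid := PySem.Int.floordiv (end_ - start) 2 + start
    if PySem.List.pyGetD numbers mid 0 = t ∧ mid ≠ o then mid
    else if PySem.List.pyGetD numbers mid 0 ≥ t then bseLoopA numbers t o start (mid - 1)
    else bseLoopA numbers t o (mid + 1) end_
  else -1
termination_by (end_ - start + 1).toNat
decreasing_by
  all_goals
    have h2 : PySem.Int.floordiv (end_ - start) 2 = (end_ - start) / 2 :=
      PySem.Int.floordiv_eq_ediv_of_pos (by norm_num)
    omega

def binary_search_except_index (numbers : List Int) (to_be_found_number : Int) (omitted_index : Int) : Int :=
  bseLoopA numbers to_be_found_number omitted_index 0 ((numbers.length : Int) - 1)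

-- ===== PORT B =====
-- Source B's helper go(sub, offset): recursion on the slice.  sub[m+1:] and sub[:m]
-- with 0 ≤ m < len(sub) are exactly drop (m+1) and take m; sub[m] is in range,
-- so pyGetD's default 0 is never used.
def bseRecB (t o : Int) (sub : List Int) (offset : Int) : Int :=
  if sub = [] then -1
  else
    let m := PySem.Int.floordiv ((sub.length : Int) - 1) 2
    if PySem.List.pyGetD sub m 0 < t then bseRecB t o (sub.drop (m.toNat + 1)) (offset + m + 1)
    else if PySem.List.pyGetD sub m 0 = t ∧ offset + m ≠ o then offset + m
    else bseRecB t o (sub.take m.toNat) offset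
termination_by sub.length
decreasing_by
  all_goals
    have h2 : PySem.Int.floordiv ((sub.length : Int) - 1) 2 = ((sub.length : Int) - 1) / 2 :=
      PySem.Int.floordiv_eq_ediv_of_pos (by norm_num)
    have h3 : sub.length ≠ 0 := by simpa [List.length_eq_zero_iff] using ‹¬ sub = []›
    simp only [List.length_drop, List.length_take]
    omega

def binary_search_except_index_alt (numbers : List Int) (to_be_found_number : Int) (omitted_index : Int) : Int :=
  bseRecB to_be_found_number omitted_index numbers 0

-- ===== PRECONDITION & SPEC =====
def Spec_binary_search_except_index (numbers : List Int) (to_be_found_number : Int) (omitted_index : Int) (out : Int) : Prop := out = binary_search_except_index_alt numbers to_be_found_number omitted_index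
instance (numbers : List Int) (to_be_found_number : Int) (omitted_index : Int) (out : Int) : Decidable (Spec_binary_search_except_index numbers to_be_found_number omitted_index out) := by unfold Spec_binary_search_except_index; infer_instance

-- ===== CLAIM (what is proved, stated in full; the proofs are below) =====
def Claim_equal_binary_search_except_index : Prop := ∀ (numbers : List Int) (to_be_found_number : Int) (omitted_index : Int), Dom_binary_search_except_index numbers to_be_found_number omitted_index → Spec_binary_search_except_index numbers to_be_found_number omitted_index (binary_search_except_index numbers to_be_found_number omitted_index)

-- ===== LEMMAS AND PROOFS =====

-- Main invariant: A's loop on window [s,e] equals B's recursion on the slice numbers[s : e+1] with offset s.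
lemma loop_eq_rec (numbers : List Int) (t o : Int) :
    ∀ (k : Nat) (s e : Int), (e - s + 1).toNat ≤ k → 0 ≤ s → e < (numbers.length : Int) →
      bseLoopA numbers t o s e = bseRecB t o ((numbers.drop s.toNat).take (e - s + 1).toNat) s := by
  intro k
  induction k with
  | zero =>
    intro s e hk hs he
    rw [bseLoopA, bseRecB]
    have h1 : ¬ s ≤ e := by omega
    have h2 : (e - s + 1).toNat = 0 := by omega
    simp [h1, h2]
  | succ k ih =>
    intro s e hk hs he
    by_cases hse : s ≤ e
    · set sub := (numbers.drop s.toNat).take (e - s + 1).toNat with hsub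
      have hlen : sub.length = (e - s + 1).toNat := by
        simp only [hsub, List.length_take, List.length_drop]
        omega
      have hne : sub ≠ [] := by
        intro h; rw [h] at hlen; simp at hlen; omega
      have hfd : PySem.Int.floordiv (e - s) 2 = (e - s) / 2 :=
        PySem.Int.floordiv_eq_ediv_of_pos (by norm_num)
      set m := (e - s) / 2 with hmdef
      have hm0 : 0 ≤ m := by omega
      have hmle : m ≤ e - s := by omega
      have hmB : PySem.Int.floordiv ((sub.length : Int) - 1) 2 = m := by
        have : ((sub.length : Int) - 1) = e - s := by rw [hlen]; omega
        rw [this, hfd]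
      have hv : PySem.List.pyGetD sub m 0 = PySem.List.pyGetD numbers (m + s) 0 := by
        rw [PySem.List.pyGetD_eq_getElem sub 0 (by omega) (by rw [hlen]; omega),
            PySem.List.pyGetD_eq_getElem numbers 0 (by omega) (by omega)]
        simp only [hsub, List.getElem_take, List.getElem_drop]
        simp [show s.toNat + m.toNat = (m + s).toNat by omega]
      rw [bseLoopA, bseRecB]
      simp only [dif_pos hse, if_neg hne, hfd, hmB, hv]
      set v := PySem.List.pyGetD numbers (m + s) 0 with hvdef
      have hms : m + s = s + m := by ring
      by_cases hvlt : v < t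
      · have h1 : ¬ (v = t ∧ m + s ≠ o) := by
          rintro ⟨h, -⟩; omega
        have h2 : ¬ v ≥ t := by omega
        rw [if_neg h1, if_neg h2, if_pos hvlt]
        rw [ih (m + s + 1) e (by omega) (by omega) he]
        have hlist : sub.drop (m.toNat + 1)
            = (numbers.drop (m + s + 1).toNat).take (e - (m + s + 1) + 1).toNat := by
          rw [hsub, List.drop_take, List.drop_drop]
          congr 1
          · omega
          · congr 1; omega
        rw [hlist, hms]
      · by_cases hveq : v = t ∧ m + s ≠ o
        · rw [if_pos hveq, if_neg hvlt, if_pos (by rw [← hms]; exact hveq), hms]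
        · have h2 : v ≥ t := by
            rcases lt_trichotomy v t with h | h | h
            · exact absurd h hvlt
            · omega
            · omega
          rw [if_neg hveq, if_pos h2, if_neg hvlt, if_neg (by rw [← hms]; exact hveq)]
          rw [ih s (m + s - 1) (by omega) hs (by omega)]
          have hlist : sub.take m.toNat
              = (numbers.drop s.toNat).take (m + s - 1 - s + 1).toNat := by
            rw [hsub, List.take_take]
            congr 1
            omega
          rw [hlist]
    · rw [bseLoopA, bseRecB]
      have h2 : (e - s + 1).toNat = 0 := by omega
      simp [hse, h2]

theorem binary_search_except_index_spec : Claim_equal_binary_search_except_index := by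
  intro numbers t o _
  unfold Spec_binary_search_except_index binary_search_except_index binary_search_except_index_alt
  rcases numbers with _ | ⟨x, xs⟩
  · rw [bseLoopA, bseRecB]; norm_num
  · have h := loop_eq_rec (x :: xs) t o ((((x :: xs).length : Int) - 1) - 0 + 1).toNat 0
      (((x :: xs).length : Int) - 1) le_rfl le_rfl (by simp)
    simpa using h
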